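-- pv_equiv track=rewrite | github.com/BodomLake/stock2 | utils/utils.py | cleanHeadZeroNum
-- ===== SOURCE A (Python) =====
-- def cleanHeadZeroNum(string):
--     newStr = ''
--     for s in string:
--         if s != '0':
--             newStr = newStr + s
--         else:
--             break
--     return newStr
-- ===== SOURCE B (Python) =====
-- def cleanHeadZeroNum(string):
--     idx = string.find('0')
--     if idx == -1:
--         return string
--     return string[:idx]
-- ===== Notes on version B (the rewrite author's own statement) =====
-- stated objective: idiomatic
-- what changed: Replaces the character-by-character accumulation loop (repeated string concatenation) with str.find('0') plus a single slice, returning the whole string when no zero occurs.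
import Mathlib
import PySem

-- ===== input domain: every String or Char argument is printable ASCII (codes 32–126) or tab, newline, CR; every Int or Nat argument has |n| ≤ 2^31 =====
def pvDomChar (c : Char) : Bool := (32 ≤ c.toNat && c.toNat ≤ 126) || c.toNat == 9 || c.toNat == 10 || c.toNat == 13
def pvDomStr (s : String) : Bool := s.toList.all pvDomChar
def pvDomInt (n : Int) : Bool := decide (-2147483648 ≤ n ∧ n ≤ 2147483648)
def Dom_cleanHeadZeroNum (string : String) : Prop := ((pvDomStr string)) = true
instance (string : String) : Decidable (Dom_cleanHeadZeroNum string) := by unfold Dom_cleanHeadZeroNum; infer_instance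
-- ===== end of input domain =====

-- B replaces A's char-by-char accumulation loop with str.find('0') and one slice (idiomatic).


-- ===== PORT A =====
-- the for-loop with break and 'newStr = newStr + s'
def cleanHeadZeroNumLoop (newStr : String) (l : List Char) : String :=
  match l with
  | [] => newStr
  | s :: rest => if s ≠ '0' then cleanHeadZeroNumLoop (newStr.push s) rest else newStr

def cleanHeadZeroNum (string : String) : String :=
  cleanHeadZeroNumLoop "" string.toList

-- ===== PORT B =====
def cleanHeadZeroNum_alt (string : String) : String :=
  let idx := PySem.Str.find string "0"
  if idx = -1 then string else PySem.Str.slice string none (some idx)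

-- ===== PRECONDITION & SPEC =====
def Spec_cleanHeadZeroNum (string : String) (out : String) : Prop := out = cleanHeadZeroNum_alt string
instance (string : String) (out : String) : Decidable (Spec_cleanHeadZeroNum string out) := by unfold Spec_cleanHeadZeroNum; infer_instance

-- ===== CLAIM (what is proved, stated in full; the proofs are below) =====
def Claim_equal_cleanHeadZeroNum : Prop := ∀ (string : String), Dom_cleanHeadZeroNum string → Spec_cleanHeadZeroNum string (cleanHeadZeroNum string)

-- ===== LEMMAS AND PROOFS =====

theorem cleanHeadZeroNumLoop_eq (acc : String) (l : List Char) :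
    cleanHeadZeroNumLoop acc l = acc ++ String.ofList (l.takeWhile (· ≠ '0')) := by
  induction l generalizing acc with
  | nil =>
    simp [cleanHeadZeroNumLoop]
  | cons c rest ih =>
    by_cases hc : c = '0'
    · subst hc; simp [cleanHeadZeroNumLoop]
    · rw [show cleanHeadZeroNumLoop acc (c :: rest) = cleanHeadZeroNumLoop (acc.push c) rest by
        simp [cleanHeadZeroNumLoop, hc]]
      rw [ih]
      apply String.toList_injective
      simp [hc]

theorem singleton_prefix_drop (l : List Char) (i : Nat) :
    ['0'] <+: l.drop i ↔ l[i]? = some '0' := by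
  rw [← List.head?_drop]
  cases l.drop i with
  | nil => simp
  | cons a t => simp [List.cons_prefix_cons, eq_comm]

theorem take_eq_takeWhile (l : List Char) (k : Nat) (hk : k < l.length)
    (hmin : ∀ i, i < k → l[i]? ≠ some '0') (hk0 : l[k]? = some '0') :
    l.takeWhile (· ≠ '0') = l.take k := by
  induction l generalizing k with
  | nil => simp at hk
  | cons c rest ih =>
    cases k with
    | zero =>
      simp only [List.getElem?_cons_zero, Option.some.injEq] at hk0
      simp [hk0]
    | succ k' =>
      have hc : ¬ c = '0' := by
        have := hmin 0 (Nat.succ_pos _)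
        simpa using this
      simp only [List.takeWhile_cons, List.take_succ_cons]
      rw [if_pos (by simpa using hc)]
      congr 1
      apply ih
      · simpa using hk
      · intro i hi
        have := hmin (i+1) (by omega)
        simpa using this
      · simpa using hk0

theorem cleanHeadZeroNum_spec' (string : String) :
    cleanHeadZeroNum string = cleanHeadZeroNum_alt string := by
  unfold cleanHeadZeroNum cleanHeadZeroNum_alt
  rw [cleanHeadZeroNumLoop_eq]
  simp only [String.empty_append]
  by_cases h : PySem.Str.find string "0" = -1
  · rw [if_pos h]
    have h' : ¬ ("0".toList <:+: string.toList) := by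
      rw [← PySem.Chars.find_eq_neg_one_iff]
      simpa using h
    have hnm : '0' ∉ string.toList := by
      intro hm
      exact h' (by simpa using (List.singleton_infix_iff '0' string.toList).mpr hm)
    apply String.toList_injective
    simp only [String.toList_ofList]
    rw [List.takeWhile_eq_self_iff.mpr]
    intro a ha
    simp only [decide_eq_true_eq]
    intro hae; exact hnm (hae ▸ ha)
  · rw [if_neg h]
    have hfind : PySem.Chars.find string.toList "0".toList =
        PySem.Str.find string "0" := by simp
    have hspec := PySem.Chars.findFrom_natCast_spec string.toList "0".toList 0
      (Nat.zero_le _) (by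
        simp only [Nat.cast_zero, PySem.Chars.findFrom_zero, hfind]; exact h)
    simp only [Nat.cast_zero, PySem.Chars.findFrom_zero, hfind] at hspec
    obtain ⟨hge, hpre, hmin⟩ := hspec
    set idx := PySem.Str.find string "0" with hidx
    have hsub : ("0".toList : List Char) = ['0'] := by decide
    rw [hsub] at hpre hmin
    have hget : string.toList[idx.toNat]? = some '0' :=
      (singleton_prefix_drop _ _).mp hpre
    have hlt : idx.toNat < string.toList.length := by
      by_contra hge'
      rw [List.getElem?_eq_none (by omega)] at hget
      simp at hget
    have hslice : PySem.Str.slice string none (some idx) =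
        String.ofList (string.toList.take idx.toNat) := by
      apply String.toList_injective
      simp only [PySem.Str.toList_slice, String.toList_ofList]
      exact PySem.List.slice_to _ hge
    rw [hslice]
    congr 1
    apply take_eq_takeWhile _ _ hlt
    · intro i hi
      have := hmin i (Nat.zero_le _) (by omega)
      rw [singleton_prefix_drop] at this
      exact this
    · exact hget

-- ===== VERDICT (by name: the statement is the Claim_ definition above) =====
theorem cleanHeadZeroNum_spec : Claim_equal_cleanHeadZeroNum := by
  intro s _
  unfold Spec_cleanHeadZeroNum
  exact cleanHeadZeroNum_spec' s
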